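-- pv_equiv track=rewrite | github.com/guan2w/srcsupy | searching/extract-assemble.py | calculate_new_columns
-- ===== SOURCE A (Python) =====
-- from typing import Any, Dict, List, Optional, Tuple
--
-- def calculate_new_columns(
--
--     url_columns: List[str],
--     result_fields: List[str],
--     header_map: Dict[str, int]
-- ) -> List[Tuple[int, str, str]]:
--     """
--     在每个 URL 列右侧插入对应的结果列
--     从右往左处理，避免列索引错乱
--     """
--     # 按列索引降序排列 URL 列（从右往左处理）
--     url_cols_with_idx = [(col, header_map[col]) for col in url_columns]
--     url_cols_with_idx.sort(key=lambda x: x[1], reverse=True)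
--
--     new_columns = []
--     for url_col, col_idx in url_cols_with_idx:
--         # 在该 URL 列右侧插入结果字段（倒序插入，保持字段顺序）
--         for field in reversed(result_fields):
--             new_col_name = f"{url_col}-{field}"
--             insert_pos = col_idx + 1  # 在 URL 列右侧
--             new_columns.append((insert_pos, new_col_name, url_col))
--
--     return new_columns
-- ===== SOURCE B (Python) =====
-- from typing import Dict, List, Tuple
--
-- def calculate_new_columns(
--     url_columns: List[str],
--     result_fields: List[str],
--     header_map: Dict[str, int]
-- ) -> List[Tuple[int, str, str]]:
--     # One flat pass over the inputs in their original order, then a single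
--     # stable sort of the OUTPUT tuples by insert position, descending.
--     flat = [
--         (header_map[col] + 1, f"{col}-{field}", col)
--         for col in url_columns
--         for field in reversed(result_fields)
--     ]
--     flat.sort(key=lambda t: t[0], reverse=True)
--     return flat
-- ===== Notes on version B (the rewrite author's own statement) =====
-- stated objective: alternative
-- what changed: Instead of sorting the (column,index) pairs descending and then running nested loops, B builds all result tuples in one flat comprehension over the inputs in their original order and performs a single stable sort of the output tuples by insert position descending.
import Mathlib
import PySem

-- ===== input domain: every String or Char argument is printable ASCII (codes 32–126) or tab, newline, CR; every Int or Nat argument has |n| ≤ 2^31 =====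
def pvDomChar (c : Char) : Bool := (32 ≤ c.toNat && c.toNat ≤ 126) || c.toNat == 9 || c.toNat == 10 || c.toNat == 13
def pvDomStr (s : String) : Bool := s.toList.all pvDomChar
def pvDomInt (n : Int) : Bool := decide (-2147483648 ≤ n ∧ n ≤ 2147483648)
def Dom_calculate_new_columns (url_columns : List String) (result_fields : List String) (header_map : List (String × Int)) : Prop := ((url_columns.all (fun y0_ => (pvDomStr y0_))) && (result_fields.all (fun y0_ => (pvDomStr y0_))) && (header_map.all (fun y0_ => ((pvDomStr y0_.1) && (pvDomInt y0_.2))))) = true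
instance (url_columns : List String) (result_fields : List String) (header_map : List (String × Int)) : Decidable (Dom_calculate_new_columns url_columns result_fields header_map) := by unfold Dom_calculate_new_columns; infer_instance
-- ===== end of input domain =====

-- B builds all result tuples in one flat pass in input order and stable-sorts the
-- output by insert position descending, instead of sorting the columns first and
-- nesting loops (objective: alternative decomposition, same result).


-- ===== PORT A =====
-- header_map[col]: Python raises KeyError when col is missing; Pre_ excludes that,
-- so the default 0 is never reached on admitted inputs.
def pvLookup (header_map : List (String × Int)) (k : String) : Int :=
  (PySem.Dict.mk header_map).getD k 0

def calculate_new_columns (url_columns : List String) (result_fields : List String) (header_map : List (String × Int)) : List (Int × String × String) :=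
  let url_cols_with_idx := url_columns.map (fun col => (col, pvLookup header_map col))
  let url_cols_sorted := PySem.List.sorted url_cols_with_idx (fun x => x.2) true
  url_cols_sorted.foldl (fun new_columns p =>
    (result_fields.reverse).foldl (fun acc field =>
      acc ++ [(p.2 + 1, p.1 ++ "-" ++ field, p.1)]) new_columns) []

-- ===== PORT B =====
def calculate_new_columns_alt (url_columns : List String) (result_fields : List String) (header_map : List (String × Int)) : List (Int × String × String) :=
  let flat := url_columns.flatMap (fun col =>
    (result_fields.reverse).map (fun field =>
      (pvLookup header_map col + 1, col ++ "-" ++ field, col)))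
  PySem.List.sorted flat (fun t => t.1) true

-- ===== PRECONDITION & SPEC =====
-- Pre_ excludes exactly the inputs on which Python A raises KeyError (a URL column
-- absent from header_map); B raises there too.
def Pre_calculate_new_columns (url_columns : List String) (result_fields : List String) (header_map : List (String × Int)) : Prop :=
  ∀ col ∈ url_columns, col ∈ header_map.map Prod.fst
instance (url_columns : List String) (result_fields : List String) (header_map : List (String × Int)) : Decidable (Pre_calculate_new_columns url_columns result_fields header_map) := by unfold Pre_calculate_new_columns; infer_instance

def pvWitness_calculate_new_columns : List String × List String × (List (String × Int)) :=
  (["url", "ref"], ["status", "title"], [("url", 0), ("ref", 2)])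

def Spec_calculate_new_columns (url_columns : List String) (result_fields : List String) (header_map : List (String × Int)) (out : List (Int × String × String)) : Prop := out = calculate_new_columns_alt url_columns result_fields header_map
instance (url_columns : List String) (result_fields : List String) (header_map : List (String × Int)) (out : List (Int × String × String)) : Decidable (Spec_calculate_new_columns url_columns result_fields header_map out) := by unfold Spec_calculate_new_columns; infer_instance

-- ===== CLAIM (what is proved, stated in full; the proofs are below) =====
def Claim_equal_calculate_new_columns : Prop := ∀ (url_columns : List String) (result_fields : List String) (header_map : List (String × Int)), Dom_calculate_new_columns url_columns result_fields header_map → Pre_calculate_new_columns url_columns result_fields header_map → Spec_calculate_new_columns url_columns result_fields header_map (calculate_new_columns url_columns result_fields header_map)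

-- ===== LEMMAS AND PROOFS =====

-- insertBy passes over a prefix it never goes before
lemma insertBy_append_left {α : Type} (before : α → α → Bool) (x : α) (p rest : List α)
    (hp : ∀ y ∈ p, before x y = false) :
    PySem.List.insertBy before x (p ++ rest) = p ++ PySem.List.insertBy before x rest := by
  induction p with
  | nil => simp
  | cons y ys ih =>
    have hy : before x y = false := hp y (by simp)
    simp [PySem.List.insertBy, hy]
    exact ih (fun z hz => hp z (by simp [hz]))

-- insertBy lands exactly between a ≥-prefix and a <-suffix
lemma insertBy_middle {α : Type} (before : α → α → Bool) (x : α) (p q : List α)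
    (hp : ∀ y ∈ p, before x y = false) (hq : ∀ y ∈ q, before x y = true) :
    PySem.List.insertBy before x (p ++ q) = p ++ x :: q := by
  rw [insertBy_append_left before x p q hp]
  cases q with
  | nil => simp [PySem.List.insertBy]
  | cons y ys => simp [PySem.List.insertBy, hq y (by simp)]

-- a whole block of equal-key elements, inserted one by one, lands contiguously
lemma foldl_insertBy_block {α : Type} (key : α → Int) (c : Int) (block p q : List α)
    (hb : ∀ x ∈ block, key x = c) (hp : ∀ y ∈ p, c ≤ key y) (hq : ∀ y ∈ q, key y < c) :
    block.foldl (fun acc x => PySem.List.insertBy (fun s t => decide (key t < key s)) x acc) (p ++ q)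
      = p ++ block ++ q := by
  induction block generalizing p with
  | nil => simp
  | cons x bs ih =>
    have hx : key x = c := hb x (by simp)
    have step : PySem.List.insertBy (fun s t => decide (key t < key s)) x (p ++ q) = p ++ x :: q := by
      apply insertBy_middle
      · intro y hy; simp only [decide_eq_false_iff_not, not_lt, hx]; exact hp y hy
      · intro y hy; simp only [decide_eq_true_eq, hx]; exact hq y hy
    have hpq : p ++ x :: q = (p ++ [x]) ++ q := by simp
    simp only [List.foldl_cons, step, hpq]
    have := ih (p ++ [x]) (fun z hz => hb z (by simp [hz]))
      (by intro y hy
          rcases List.mem_append.mp hy with h | h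
          · exact hp y h
          · simp at h; simp [h, hx])
    rw [this]; simp

-- a block foldl of inserts skips a prefix none of its elements goes before
lemma foldl_insertBy_skip {α : Type} (before : α → α → Bool) (block p rest : List α)
    (hp : ∀ x ∈ block, ∀ y ∈ p, before x y = false) :
    block.foldl (fun acc x => PySem.List.insertBy before x acc) (p ++ rest)
      = p ++ block.foldl (fun acc x => PySem.List.insertBy before x acc) rest := by
  induction block generalizing rest with
  | nil => simp
  | cons x bs ih =>
    simp only [List.foldl_cons]
    rw [insertBy_append_left before x p rest (hp x (by simp))]
    exact ih _ (fun z hz => hp z (by simp [hz]))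

-- inserting one pair a into a key-descending list m commutes with expanding
-- each pair into its block of result tuples
lemma block_step (f : (String × Int) → List (Int × String × String))
    (hf : ∀ p x, x ∈ f p → x.1 = p.2 + 1)
    (m : List (String × Int)) (hm : m.Pairwise (fun a b => b.2 ≤ a.2)) (a : String × Int) :
    (f a).foldl (fun acc x => PySem.List.insertBy (fun s t => decide (t.1 < s.1)) x acc)
        (m.flatMap f)
      = (PySem.List.insertBy (fun s t => decide (t.2 < s.2)) a m).flatMap f := by
  induction m with
  | nil =>
    simp only [List.flatMap_nil, PySem.List.insertBy, List.flatMap_cons, List.flatMap_nil,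
      List.append_nil]
    have := foldl_insertBy_block (fun t => t.1) (a.2 + 1) (f a) [] []
      (fun x hx => hf a x hx) (by simp) (by simp)
    simpa using this
  | cons b bs ih =>
    have hhead : ∀ y ∈ bs, y.2 ≤ b.2 := (List.pairwise_cons.mp hm).1
    have htail := (List.pairwise_cons.mp hm).2
    by_cases h : b.2 < a.2
    · have hins : PySem.List.insertBy (fun s t => decide (t.2 < s.2)) a (b :: bs)
          = a :: b :: bs := by simp [PySem.List.insertBy, h]
      rw [hins]
      have hq : ∀ y ∈ (b :: bs).flatMap f, y.1 < a.2 + 1 := by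
        intro y hy
        rcases List.mem_flatMap.mp hy with ⟨z, hz, hyz⟩
        have : z.2 ≤ b.2 := by
          rcases hz with _ | hz
          · exact le_refl _
          · exact hhead z (by assumption)
        have := hf z y hyz
        omega
      have := foldl_insertBy_block (fun t => t.1) (a.2 + 1) (f a) [] ((b :: bs).flatMap f)
        (fun x hx => hf a x hx) (by simp) hq
      simpa using this
    · have hins : PySem.List.insertBy (fun s t => decide (t.2 < s.2)) a (b :: bs)
          = b :: PySem.List.insertBy (fun s t => decide (t.2 < s.2)) a bs := by
        simp [PySem.List.insertBy, h]
      rw [hins]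
      simp only [List.flatMap_cons]
      rw [foldl_insertBy_skip _ (f a) (f b) (bs.flatMap f)
        (by intro x hx y hy
            have hx1 := hf a x hx
            have hy1 := hf b y hy
            simp only [decide_eq_false_iff_not, not_lt, hx1, hy1]
            omega)]
      rw [ih htail]

-- the main commuting lemma: stable reverse-sorting the flat tuple list by its
-- first component equals expanding the pairs after reverse-sorting them by index
lemma sorted_flatMap (f : (String × Int) → List (Int × String × String))
    (hf : ∀ p x, x ∈ f p → x.1 = p.2 + 1) (l : List (String × Int)) :
    PySem.List.sorted (l.flatMap f) (fun t => t.1) true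
      = (PySem.List.sorted l (fun p => p.2) true).flatMap f := by
  induction l using List.reverseRecOn with
  | nil => simp [PySem.List.sorted_rev_eq_foldl_insertBy]
  | append_singleton l a ih =>
    rw [PySem.List.sorted_rev_eq_foldl_insertBy, PySem.List.sorted_rev_eq_foldl_insertBy,
      List.flatMap_append, List.foldl_append, List.foldl_append]
    rw [← PySem.List.sorted_rev_eq_foldl_insertBy, ← PySem.List.sorted_rev_eq_foldl_insertBy, ih]
    simp only [List.flatMap_cons, List.flatMap_nil, List.append_nil, List.foldl_cons,
      List.foldl_nil]
    exact block_step f hf _ (PySem.List.sorted_pairwise_rev l (fun p => p.2)) a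

-- ===== VERDICT (by name: the statement is the Claim_ definition above) =====
theorem calculate_new_columns_spec : Claim_equal_calculate_new_columns := by
  intro url_columns result_fields header_map _ _
  unfold Spec_calculate_new_columns calculate_new_columns calculate_new_columns_alt
  simp only [PySem.List.foldl_append_singleton_eq_map, PySem.List.foldl_append_eq_flatMap]
  rw [show (url_columns.flatMap (fun col =>
        (result_fields.reverse).map (fun field =>
          (pvLookup header_map col + 1, col ++ "-" ++ field, col))))
      = (url_columns.map (fun col => (col, pvLookup header_map col))).flatMap
          (fun p => (result_fields.reverse).map (fun field =>
            (p.2 + 1, p.1 ++ "-" ++ field, p.1))) by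
    simp [List.flatMap_map]]
  rw [sorted_flatMap _ (by intro p x hx; rcases List.mem_map.mp hx with ⟨fld, _, rfl⟩; rfl)]
  simp
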